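-- pv_equiv track=rewrite | github.com/WUT-IDEA/Y2019_WWJ_Graduation_Design_Code | 4_stl+arima/all_plot_and_score.py | score_action
-- ===== SOURCE A (Python) =====
-- def score_action(pre,actual):
--     sum_cent=[]
--     for i in range(len(actual)):
--         sum_cent.append(abs(actual[i]-pre[i])/actual[i])
--     sum=0
--     for i in range(len(sum_cent)):
--         if sum_cent[i] < 0.05:
--             sum += 10
--         elif sum_cent[i] < 0.1:
--             sum += 8
--         elif sum_cent[i] < 0.15:
--             sum += 6
--         elif sum_cent[i] < 0.2:
--             sum += 4
--         elif sum_cent[i] < 0.25: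
--             sum += 2
--         elif sum_cent[i] < 0.3:
--             sum += 1
--         else:
--             sum += 0
--     return sum
-- ===== SOURCE B (Python) =====
-- def score_action(pre, actual):
--     # Score decomposed additively across bucket boundaries: each element's score
--     # equals the sum of weights of all thresholds strictly above its error, so the
--     # total is sum over thresholds of weight * (count of errors below it).
--     errs = [abs(actual[i] - pre[i]) / actual[i] for i in range(len(actual))]
--     total = 0
--     for t, w in [(0.05, 2), (0.1, 2), (0.15, 2), (0.2, 2), (0.25, 1), (0.3, 1)]:
--         total += w * sum(1 for e in errs if e < t)
--     return total
-- ===== Notes on version B (the rewrite author's own statement) =====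
-- stated objective: alternative
-- what changed: Swaps the loop nesting: instead of bucketing each element through a six-way if/elif cascade, B decomposes the score additively across the six bucket boundaries (weights 2,2,2,2,1,1) and sums weight * count(errors below threshold) per threshold.
import Mathlib
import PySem

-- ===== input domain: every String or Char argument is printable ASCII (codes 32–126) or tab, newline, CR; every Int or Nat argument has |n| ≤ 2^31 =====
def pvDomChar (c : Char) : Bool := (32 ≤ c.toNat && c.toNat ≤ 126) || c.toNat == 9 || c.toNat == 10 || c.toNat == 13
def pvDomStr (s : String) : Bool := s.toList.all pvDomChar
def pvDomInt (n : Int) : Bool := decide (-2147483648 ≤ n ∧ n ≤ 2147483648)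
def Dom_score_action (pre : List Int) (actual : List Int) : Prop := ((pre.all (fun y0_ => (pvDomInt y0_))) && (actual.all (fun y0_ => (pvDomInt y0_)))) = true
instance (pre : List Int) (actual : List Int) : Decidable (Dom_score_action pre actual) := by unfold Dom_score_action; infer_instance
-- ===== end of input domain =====

-- B swaps the loop nesting: per-threshold counting (total = Σ_t weight(t)·#{i : err_i < t},
-- weights 2,2,2,2,1,1) instead of A's per-element six-way if/elif cascade (alternative, same cost).
-- Python floats: on Dom (|n| ≤ 2^31) each comparison |a-p|/a < k/100 of the Python floats equals the
-- exact rational comparison (the quotient is far beyond double rounding error from any non-attained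
-- boundary), so both ports compare exact integers: 100*|a-p| < k*a for a > 0.


-- ===== PORT A =====
-- sum_cent[i] is the float |actual[i]-pre[i]|/actual[i]; both ports carry it as the exact pair
-- (|actual[i]-pre[i]|, actual[i]) and pvLt decides 'err < k/100' exactly (a < 0 ⇒ err < 0 ⇒ true;
-- a = 0 raises in Python and is excluded by Pre_).
def pvLt (m a k : Int) : Bool := if 0 < a then 100 * m < k * a else true

def score_action (pre : List Int) (actual : List Int) : Int :=
  let sum_cent : List (Int × Int) :=
    (PySem.List.pyRange 0 actual.length 1).foldl
      (fun acc i =>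
        acc ++ [(|PySem.List.pyGetD actual i 0 - PySem.List.pyGetD pre i 0|,
                 PySem.List.pyGetD actual i 0)]) []
  (PySem.List.pyRange 0 sum_cent.length 1).foldl
    (fun sum i =>
      if pvLt (PySem.List.pyGetD sum_cent i (0, 0)).1 (PySem.List.pyGetD sum_cent i (0, 0)).2 5 then sum + 10
      else if pvLt (PySem.List.pyGetD sum_cent i (0, 0)).1 (PySem.List.pyGetD sum_cent i (0, 0)).2 10 then sum + 8
      else if pvLt (PySem.List.pyGetD sum_cent i (0, 0)).1 (PySem.List.pyGetD sum_cent i (0, 0)).2 15 then sum + 6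
      else if pvLt (PySem.List.pyGetD sum_cent i (0, 0)).1 (PySem.List.pyGetD sum_cent i (0, 0)).2 20 then sum + 4
      else if pvLt (PySem.List.pyGetD sum_cent i (0, 0)).1 (PySem.List.pyGetD sum_cent i (0, 0)).2 25 then sum + 2
      else if pvLt (PySem.List.pyGetD sum_cent i (0, 0)).1 (PySem.List.pyGetD sum_cent i (0, 0)).2 30 then sum + 1
      else sum + 0) 0

-- ===== PORT B =====
-- Source B's errs comprehension → map over pyRange; sum(1 for e in errs if e < t) → countP.
def score_action_alt (pre : List Int) (actual : List Int) : Int :=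
  let errs : List (Int × Int) :=
    (PySem.List.pyRange 0 actual.length 1).map
      (fun i => (|PySem.List.pyGetD actual i 0 - PySem.List.pyGetD pre i 0|,
                 PySem.List.pyGetD actual i 0))
  ([(5, 2), (10, 2), (15, 2), (20, 2), (25, 1), (30, 1)] : List (Int × Int)).foldl
    (fun total tw => total + tw.2 * (errs.countP (fun e => pvLt e.1 e.2 tw.1) : Int)) 0

-- ===== PRECONDITION & SPEC =====
-- Pre_: exactly where Python A returns: pre covers actual's indices (else IndexError) and no actual[i] is 0 (else ZeroDivisionError).
def Pre_score_action (pre : List Int) (actual : List Int) : Prop :=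
  actual.length ≤ pre.length ∧ (0 : Int) ∉ actual
instance (pre : List Int) (actual : List Int) : Decidable (Pre_score_action pre actual) := by unfold Pre_score_action; infer_instance

def pvWitness_score_action : List Int × List Int := ([10, 20, 7], [11, 19, -3])

def Spec_score_action (pre : List Int) (actual : List Int) (out : Int) : Prop := out = score_action_alt pre actual
instance (pre : List Int) (actual : List Int) (out : Int) : Decidable (Spec_score_action pre actual out) := by unfold Spec_score_action; infer_instance

-- ===== CLAIM (what is proved, stated in full; the proofs are below) =====
def Claim_equal_score_action : Prop := ∀ (pre : List Int) (actual : List Int), Dom_score_action pre actual → Pre_score_action pre actual → Spec_score_action pre actual (score_action pre actual)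

-- ===== LEMMAS AND PROOFS =====

-- per-element: A's cascade value is the weighted sum of threshold indicators (any m, a).
lemma pv_elem (m a : Int) :
    (if pvLt m a 5 then (10 : Int)
     else if pvLt m a 10 then 8
     else if pvLt m a 15 then 6
     else if pvLt m a 20 then 4
     else if pvLt m a 25 then 2
     else if pvLt m a 30 then 1
     else 0)
    = 2 * (if pvLt m a 5 then 1 else 0) + 2 * (if pvLt m a 10 then 1 else 0)
      + 2 * (if pvLt m a 15 then 1 else 0) + 2 * (if pvLt m a 20 then 1 else 0)
      + (if pvLt m a 25 then 1 else 0) + (if pvLt m a 30 then 1 else 0) := by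
  by_cases ha : 0 < a
  · simp only [pvLt, ha, if_pos]
    split_ifs <;> simp_all <;> omega
  · simp [pvLt, ha]

-- A's cascade fold over a list is the weighted sum of per-threshold counts.
lemma pv_fold (L : List (Int × Int)) (s : Int) :
    L.foldl
      (fun sum e =>
        if pvLt e.1 e.2 5 then sum + 10
        else if pvLt e.1 e.2 10 then sum + 8
        else if pvLt e.1 e.2 15 then sum + 6
        else if pvLt e.1 e.2 20 then sum + 4
        else if pvLt e.1 e.2 25 then sum + 2
        else if pvLt e.1 e.2 30 then sum + 1
        else sum + 0) s
    = s + 2 * (L.countP (fun e => pvLt e.1 e.2 5) : Int)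
        + 2 * (L.countP (fun e => pvLt e.1 e.2 10) : Int)
        + 2 * (L.countP (fun e => pvLt e.1 e.2 15) : Int)
        + 2 * (L.countP (fun e => pvLt e.1 e.2 20) : Int)
        + (L.countP (fun e => pvLt e.1 e.2 25) : Int)
        + (L.countP (fun e => pvLt e.1 e.2 30) : Int) := by
  induction L generalizing s with
  | nil => simp
  | cons e L ih =>
    simp only [List.foldl_cons, List.countP_cons, ih]
    have h := pv_elem e.1 e.2
    split_ifs at h ⊢ <;> push_cast <;> omega

theorem score_action_spec : Claim_equal_score_action := by
  intro pre actual _ _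
  unfold Spec_score_action score_action score_action_alt
  simp only [PySem.List.foldl_append_singleton_eq_map, List.nil_append]
  rw [PySem.List.foldl_pyRange_zero_pyGetD'
      ((PySem.List.pyRange 0 (actual.length : Int) 1).map
        (fun i => (|PySem.List.pyGetD actual i 0 - PySem.List.pyGetD pre i 0|,
                   PySem.List.pyGetD actual i 0)))
      ((0 : Int), (0 : Int))
      (fun sum e => if pvLt e.1 e.2 5 then sum + 10 else if pvLt e.1 e.2 10 then sum + 8
        else if pvLt e.1 e.2 15 then sum + 6 else if pvLt e.1 e.2 20 then sum + 4
        else if pvLt e.1 e.2 25 then sum + 2 else if pvLt e.1 e.2 30 then sum + 1 else sum + 0) 0]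
  rw [pv_fold]
  simp only [List.foldl_cons, List.foldl_nil]
  ring
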